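-- pv_equiv track=rewrite | github.com/adamlek/MultiNERD | dataloader.py | bpe_to_btype
-- ===== SOURCE A (Python) =====
-- from itertools import groupby
--
-- def bpe_to_btype(_labels):
--     """
--     set only the first bpe-token of the named entity to B-[type]
--     "the Com-pa-ny Na-me jac-ket was nice"
--      O   B   I  I  I  I  O   O   O   O
--
--     A tad bit inefficient, but it works.
--     """
--     labels = []
--     for i in range(len(_labels)):
--         labels_i = []
--         # group consecutive labels of the same type togheter
--         f = [(i, list(j)) for i, j in groupby(_labels[i])]
--         for n, lbls in f:
--             if 'B' in n:
--                 if len(lbls) > 1: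
--                     # replace sequences with multiple B-[type] labels
--                     lbls[1:] = [x.replace('B-', 'I-') for x in lbls[1:]]
--             labels_i += lbls
--         labels.append(labels_i)
--     return labels
-- ===== SOURCE B (Python) =====
-- def bpe_to_btype(_labels):
--     labels = []
--     for row in _labels:
--         out = []
--         prev = None
--         for lab in row:
--             if 'B' in lab and lab == prev:
--                 out.append(lab.replace('B-', 'I-'))
--             else:
--                 out.append(lab)
--             prev = lab
--         labels.append(out)
--     return labels
-- ===== Notes on version B (the rewrite author's own statement) =====
-- stated objective: simpler
-- what changed: Replaces the itertools.groupby grouping, group-list building and slice-assignment rewriting with a single predecessor-tracking pass that demotes a label when it repeats its immediate predecessor.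
import Mathlib
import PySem

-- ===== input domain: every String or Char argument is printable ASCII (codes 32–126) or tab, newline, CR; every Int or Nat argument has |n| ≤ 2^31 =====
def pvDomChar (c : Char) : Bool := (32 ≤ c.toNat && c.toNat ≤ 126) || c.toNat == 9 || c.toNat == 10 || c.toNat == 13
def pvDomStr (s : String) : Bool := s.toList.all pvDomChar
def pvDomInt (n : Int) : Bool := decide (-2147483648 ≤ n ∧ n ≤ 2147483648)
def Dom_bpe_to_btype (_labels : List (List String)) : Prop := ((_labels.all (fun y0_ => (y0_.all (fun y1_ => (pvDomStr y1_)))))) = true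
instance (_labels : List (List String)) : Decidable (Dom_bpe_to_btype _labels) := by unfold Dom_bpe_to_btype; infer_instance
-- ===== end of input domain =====

-- B replaces A's itertools.groupby grouping + slice-assignment rewriting by a single
-- predecessor-tracking pass per row (objective: simpler).

-- ===== PORT A =====
-- itertools.groupby on a list of strings (no key function): runs of consecutive equal elements
def pyGroupbyA (l : List String) : List (String × List String) :=
  match l with
  | [] => []
  | a :: t => (a, a :: t.takeWhile (· == a)) :: pyGroupbyA (t.dropWhile (· == a))
termination_by l.length
decreasing_by
  simp only [List.length_cons]
  exact Nat.lt_succ_of_le (List.length_dropWhile_le _ _)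

-- the body of A's outer loop: build labels_i for one row
def rowA (row : List String) : List String :=
  (pyGroupbyA row).foldl (fun acc g =>
    acc ++ (if PySem.Str.isIn "B" g.1 then
              (if g.2.length > 1 then
                 g.2.take 1 ++ (g.2.drop 1).map (fun x => PySem.Str.replace x "B-" "I-")
               else g.2)
            else g.2)) []

def bpe_to_btype (_labels : List (List String)) : List (List String) :=
  _labels.map rowA

-- ===== PORT B =====
def rowB (prev : Option String) (l : List String) : List String :=
  match l with
  | [] => []
  | lab :: rest =>
      (if PySem.Str.isIn "B" lab && (some lab == prev) then
         PySem.Str.replace lab "B-" "I-"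
       else lab) :: rowB (some lab) rest

def bpe_to_btype_alt (_labels : List (List String)) : List (List String) :=
  _labels.map (fun row => rowB none row)

-- ===== PRECONDITION & SPEC =====
def Spec_bpe_to_btype (_labels : List (List String)) (out : List (List String)) : Prop := out = bpe_to_btype_alt _labels
instance (_labels : List (List String)) (out : List (List String)) : Decidable (Spec_bpe_to_btype _labels out) := by unfold Spec_bpe_to_btype; infer_instance

-- ===== CLAIM (what is proved, stated in full; the proofs are below) =====
def Claim_equal_bpe_to_btype : Prop := ∀ (_labels : List (List String)), Dom_bpe_to_btype _labels → Spec_bpe_to_btype _labels (bpe_to_btype _labels)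

-- ===== LEMMAS AND PROOFS =====

-- A's foldl-with-append over groups is a flatMap
theorem rowA_eq_flatMap (row : List String) :
    rowA row = (pyGroupbyA row).flatMap (fun g =>
      (if PySem.Str.isIn "B" g.1 then
        (if g.2.length > 1 then
           g.2.take 1 ++ (g.2.drop 1).map (fun x => PySem.Str.replace x "B-" "I-")
         else g.2)
       else g.2)) := by
  unfold rowA
  generalize pyGroupbyA row = gs
  induction gs with
  | nil => rfl
  | cons g gs ih =>
      simp only [List.flatMap_cons, List.foldl_cons, List.nil_append, ← ih]
      generalize (if PySem.Str.isIn "B" g.1 then _ else g.2) = h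
      clear ih
      induction gs generalizing h with
      | nil => simp
      | cons g' gs' ih' => simp only [List.foldl_cons]
                           rw [ih', ih']
                           simp

-- running B with prev = some a through a run of elements all equal to a
theorem rowB_run (a : String) (t d : List String) (ht : ∀ x ∈ t, x = a) :
    rowB (some a) (t ++ d)
      = (if PySem.Str.isIn "B" a then t.map (fun x => PySem.Str.replace x "B-" "I-") else t)
        ++ rowB (some a) d := by
  induction t with
  | nil => simp
  | cons x t ih =>
      have hx : x = a := ht x (by simp)
      subst hx
      simp only [List.cons_append, rowB]
      rw [ih (fun y hy => ht y (by simp [hy]))]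
      cases hB : PySem.Chars.isIn ['B'] x.toList <;> simp [hB]

theorem head_dropWhile_ne (a : String) (t : List String) (b : String)
    (h : (t.dropWhile (· == a)).head? = some b) : ¬ b = a := by
  induction t with
  | nil => simp at h
  | cons y t ih =>
      by_cases hy : (y == a) = true
      · exact ih (by simpa [List.dropWhile_cons, hy] using h)
      · simp [hy] at h
        subst h
        exact fun hba => hy (by simp [hba])

theorem row_main (l : List String) (p : Option String)
    (hp : ∀ a, l.head? = some a → ¬ p = some a) :
    rowA l = rowB p l := by
  match l with
  | [] => simp [rowA, pyGroupbyA, rowB]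
  | a :: t =>
    have hpa : ¬ p = some a := hp a rfl
    have hsplit : t = t.takeWhile (· == a) ++ t.dropWhile (· == a) :=
      (List.takeWhile_append_dropWhile).symm
    have htw : ∀ x ∈ t.takeWhile (· == a), x = a := by
      intro x hx
      have := List.mem_takeWhile_imp hx
      simpa using this
    have ihd : rowA (t.dropWhile (· == a)) = rowB (some a) (t.dropWhile (· == a)) := by
      apply row_main
      intro b hb hab
      exact head_dropWhile_ne a t b hb (by injection hab with h; exact h.symm)
    -- compute the A side
    rw [rowA_eq_flatMap]
    have hg : pyGroupbyA (a :: t)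
        = (a, a :: t.takeWhile (· == a)) :: pyGroupbyA (t.dropWhile (· == a)) := by
      rw [pyGroupbyA]
    rw [hg, List.flatMap_cons, ← rowA_eq_flatMap, ihd]
    -- compute the B side
    have hcond : (PySem.Str.isIn "B" a && (some a == p)) = false := by
      have hne : (some a == p) = false := by
        cases p with
        | none => rfl
        | some q =>
            have : a ≠ q := fun h => hpa (by rw [h])
            simp [this]
      simp [hne]
    have hr : rowB p (a :: t) = a :: rowB (some a) t := by
      conv_lhs => rw [rowB]
      rw [hcond]
      simp
    rw [hr]
    conv_rhs => rw [hsplit]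
    rw [rowB_run a _ _ htw]
    -- now both sides: group-output ++ rest vs a :: (run ++ rest)
    generalize hTW : List.takeWhile (fun x => x == a) t = tw at htw ⊢
    cases tw with
    | nil => simp
    | cons y ys =>
        have hy : y = a := htw y (by simp)
        rw [hy]
        cases hB : PySem.Chars.isIn ['B'] a.toList <;> simp [hB]
termination_by l.length
decreasing_by
  simp only [List.length_cons]
  exact Nat.lt_succ_of_le (List.length_dropWhile_le _ _)

-- ===== VERDICT (by name: the statement is the Claim_ definition above) =====
theorem bpe_to_btype_spec : Claim_equal_bpe_to_btype := by
  intro _labels _hd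
  unfold Spec_bpe_to_btype bpe_to_btype bpe_to_btype_alt
  apply List.map_congr_left
  intro row _
  exact row_main row none (by intro a _ h; cases h)
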